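-- pv_equiv track=rewrite | github.com/Lusanda-Hlela/codewars | intermediate_level/highest_scoring_word.py | high
-- ===== SOURCE A (Python) =====
-- def high(x):
--     '''List on alphabets'''
--     alphabets = list()
--     for i in range(ord('a'), ord('z') + 1):
--         i = chr(i)
--         alphabets.append(i)
--
--     '''List of scores per alphabets'''
--     numbers = list()
--     for i in range(1, 27):
--         numbers.append(i)
--
--     '''Dictionary of alphabets as keys, and scores as values'''
--     d = dict()
--     for key in alphabets:
--         for value in numbers:
--             d[key] = value
--             numbers.remove(value)
--             break
--
--     '''Find the length of each word'''
--     l = list()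
--     for i in x.split():
--         length = len(i)
--         l.append(length)
--
--     '''Create a list of scores for each letter in the string'''
--     scores = list()
--     for i in x.split():
--         for j in i:
--             s = d[j]
--             scores.append(s)
--
--     '''Create a list of total scores for each word
--     Use the word length to perform the task'''
--     ts = list()
--     for i in l:
--         w = scores[:i]
--         s = sum(w)
--         ts.append(s)
--         scores = scores[i:]
--         s = 0
--
--     '''Create a dictionary, keys = words, values = total score of the word'''
--     database = dict()
--     for i in x.split():
--         for j in ts:
--             database[i] = j
--             ts.remove(j)
--             break
--
--     '''Return the results to the function call'''
--     return max(database, key = lambda k: database[k])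
-- ===== SOURCE B (Python) =====
-- def high(x):
--     best_word, best_score = '', -1
--     for w in x.split():
--         s = sum(map(ord, w)) - 96 * len(w)
--         if s > best_score:
--             best_word, best_score = w, s
--     return best_word
-- ===== Notes on version B (the rewrite author's own statement) =====
-- stated objective: faster
-- what changed: Replaced A's seven-pass pipeline (alphabet dict built by repeated list.remove, per-word length list, flat score list repeatedly sliced, a word->score dict, then max over the dict) by a single pass over the words that scores each word once and keeps the first strict maximum.
import Mathlib
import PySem

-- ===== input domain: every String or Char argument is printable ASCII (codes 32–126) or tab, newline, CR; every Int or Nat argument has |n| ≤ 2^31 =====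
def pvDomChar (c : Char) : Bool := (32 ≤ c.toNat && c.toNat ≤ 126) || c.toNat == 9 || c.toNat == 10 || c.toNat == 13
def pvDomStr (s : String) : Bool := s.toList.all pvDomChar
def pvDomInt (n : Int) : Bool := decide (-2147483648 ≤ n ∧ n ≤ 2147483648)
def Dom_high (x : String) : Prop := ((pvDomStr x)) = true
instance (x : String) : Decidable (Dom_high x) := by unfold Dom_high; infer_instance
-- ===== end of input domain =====

-- B replaces A's seven-pass pipeline by one linear pass over the words (objective: faster).

-- ===== PORT A =====
-- Literal transliteration of A.  d[j] (KeyError on a non-lowercase letter) and max() of an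
-- empty dict (ValueError) are the raising spots; Pre_high excludes exactly those inputs,
-- so the .getD defaults below are never reached inside Pre_high.
def high (x : String) : String :=
  let alphabets : List Char :=
    (PySem.List.pyRange 97 123 1).foldl (fun acc i => acc ++ [Char.ofNat i.toNat]) []
  let numbers : List Int :=
    (PySem.List.pyRange 1 27 1).foldl (fun acc i => acc ++ [i]) []
  let dState :=
    alphabets.foldl (fun (st : PySem.Dict Char Int × List Int) key =>
      match st.2 with
      | [] => st
      | v :: _ => (st.1.insert key v, (PySem.List.remove? st.2 v).getD st.2))
      (PySem.Dict.empty, numbers)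
  let d := dState.1
  let l : List Int :=
    (PySem.Str.split₀ x).foldl (fun acc i => acc ++ [PySem.Str.len i]) []
  let scores : List Int :=
    (PySem.Str.split₀ x).foldl
      (fun acc i => i.toList.foldl (fun acc2 j => acc2 ++ [d.getD j 0]) acc) []
  let tsState :=
    l.foldl (fun (st : List Int × List Int) i =>
      (st.1 ++ [(PySem.List.slice st.2 none (some i)).sum], PySem.List.slice st.2 (some i) none))
      ([], scores)
  let ts := tsState.1
  let dbState :=
    (PySem.Str.split₀ x).foldl (fun (st : PySem.Dict String Int × List Int) i =>
      match st.2 with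
      | [] => st
      | j :: _ => (st.1.insert i j, (PySem.List.remove? st.2 j).getD st.2))
      (PySem.Dict.empty, ts)
  let database := dbState.1
  (PySem.List.max? database.keys (fun k => database.getD k 0)).getD ""

-- ===== PORT B =====
def high_alt (x : String) : String :=
  ((PySem.Str.split₀ x).foldl (fun (best : String × Int) w =>
      let s := (w.toList.map (fun c => (c.toNat : Int))).sum - 96 * PySem.Str.len w
      if best.2 < s then (w, s) else best) ("", -1)).1

-- ===== PRECONDITION & SPEC =====
-- Pre_high excludes exactly the inputs on which A raises: a string with no lowercase letter
-- (max() of an empty dict raises ValueError) and a string containing a character that is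
-- neither a lowercase letter nor whitespace (d[j] raises KeyError).
def Pre_high (x : String) : Prop :=
  (x.toList.any (fun c => 97 ≤ c.toNat && c.toNat ≤ 122)) = true ∧
  (x.toList.all (fun c =>
    (97 ≤ c.toNat && c.toNat ≤ 122) || c == ' ' || c == '\t' || c == '\n' || c == '\r')) = true
instance (x : String) : Decidable (Pre_high x) := by unfold Pre_high; infer_instance
def pvWitness_high : String := "hello world"
def Spec_high (x : String) (out : String) : Prop := out = high_alt x
instance (x : String) (out : String) : Decidable (Spec_high x out) := by unfold Spec_high; infer_instance

-- ===== CLAIM (what is proved, stated in full; the proofs are below) =====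
def Claim_equal_high : Prop := ∀ (x : String), Dom_high x → Pre_high x → Spec_high x (high x)

-- ===== LEMMAS AND PROOFS =====

-- the per-word score both programs compute
def wScore (w : String) : Int := (w.toList.map (fun c => (c.toNat : Int) - 96)).sum

-- the step of Python's max(…, key=…): keep the first extremal element
def mstep (acc : Option String) (x : String) : Option String :=
  match acc with
  | none => some x
  | some m => if wScore m < wScore x then some x else some m

-- structural form of PySem.Set.update: the freshly appended elements
def ddGo (seen : List String) : List String → List String
  | [] => []
  | x :: xs => if PySem.Set.contains seen x then ddGo seen xs else x :: ddGo (seen ++ [x]) xs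

-- the closed alphabet-scores dict built by A (definitionally the term inside `high`)
def dA : PySem.Dict Char Int :=
  ((PySem.List.pyRange 97 123 1).foldl (fun acc i => acc ++ [Char.ofNat i.toNat]) []).foldl
    (fun (st : PySem.Dict Char Int × List Int) key =>
      match st.2 with
      | [] => st
      | v :: _ => (st.1.insert key v, (PySem.List.remove? st.2 v).getD st.2))
    (PySem.Dict.empty, (PySem.List.pyRange 1 27 1).foldl (fun acc i => acc ++ [i]) [])
  |>.1

theorem dA_getD (c : Char) (h1 : 97 ≤ c.toNat) (h2 : c.toNat ≤ 122) :
    dA.getD c 0 = (c.toNat : Int) - 96 := by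
  have hc : c = Char.ofNat c.toNat := (Char.ofNat_toNat c).symm
  rw [hc]
  generalize hn : c.toNat = n at h1 h2 ⊢
  interval_cases n <;> decide

-- every word split₀ produces is nonempty and made of chars of s that P covers
theorem go_sound (P : Char → Prop) :
    ∀ (s cur : List Char) (acc : List (List Char)),
      (∀ c ∈ s, PySem.Chars.isspace c = true ∨ P c) →
      (∀ c ∈ cur, P c) →
      (∀ w ∈ acc, w ≠ [] ∧ ∀ c ∈ w, P c) →
      ∀ w ∈ PySem.Chars.split₀.go s cur acc, w ≠ [] ∧ ∀ c ∈ w, P c := by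
  intro s
  induction s with
  | nil =>
    intro cur acc _ hcur hacc w hw
    simp only [PySem.Chars.split₀.go] at hw
    split at hw
    · exact hacc w (by simpa using hw)
    · rename_i hne
      rcases (by simpa using hw : w ∈ acc ∨ w = cur.reverse) with h | h
      · exact hacc w h
      · subst h
        refine ⟨by simpa [List.isEmpty_iff] using hne, ?_⟩
        intro c hc; exact hcur c (by simpa using hc)
  | cons c rest ih =>
    intro cur acc hs hcur hacc w hw
    simp only [PySem.Chars.split₀.go] at hw
    have hrest : ∀ d ∈ rest, PySem.Chars.isspace d = true ∨ P d :=
      fun d hd => hs d (List.mem_cons_of_mem _ hd)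
    split at hw
    · split at hw
      · exact ih [] acc hrest (by simp) hacc w hw
      · rename_i hsp hne
        refine ih [] (cur.reverse :: acc) hrest (by simp) ?_ w hw
        intro v hv
        rcases List.mem_cons.mp hv with h | h
        · subst h
          refine ⟨by simpa [List.isEmpty_iff] using hne, ?_⟩
          intro d hd; exact hcur d (by simpa using hd)
        · exact hacc v h
    · rename_i hsp
      refine ih (c :: cur) acc hrest ?_ hacc w hw
      intro d hd
      rcases List.mem_cons.mp hd with h | h
      · subst h
        rcases hs d (by simp) with h' | h'
        · exact absurd h' (by simpa using hsp)
        · exact h'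
      · exact hcur d h

-- split₀ is nonempty as soon as some char is not whitespace
theorem go_ne :
    ∀ (s cur : List Char) (acc : List (List Char)),
      ((∃ c ∈ s, PySem.Chars.isspace c = false) ∨ cur ≠ [] ∨ acc ≠ []) →
      PySem.Chars.split₀.go s cur acc ≠ [] := by
  intro s
  induction s with
  | nil =>
    intro cur acc h
    simp only [PySem.Chars.split₀.go]
    split
    · rename_i he
      rcases h with ⟨c, hc, _⟩ | h | h
      · exact absurd hc (by simp)
      · exact absurd (List.isEmpty_iff.mp he) h
      · simpa
    · simp
  | cons c rest ih =>
    intro cur acc h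
    simp only [PySem.Chars.split₀.go]
    split
    · rename_i hsp
      split
      · rename_i he
        apply ih
        rcases h with ⟨d, hd, hd'⟩ | hcur | hacc
        · rcases List.mem_cons.mp hd with h1 | h1
          · subst h1; rw [hsp] at hd'; cases hd'
          · exact Or.inl ⟨d, h1, hd'⟩
        · exact absurd (List.isEmpty_iff.mp he) hcur
        · exact Or.inr (Or.inr hacc)
      · exact ih [] _ (Or.inr (Or.inr (by simp)))
    · exact ih (c :: cur) acc (Or.inr (Or.inl (by simp)))

theorem lc_not_space (c : Char) (h1 : 97 ≤ c.toNat) (h2 : c.toNat ≤ 122) :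
    PySem.Chars.isspace c = false := by
  simp only [PySem.Chars.isspace]
  simp only [Bool.or_eq_false_iff, Bool.and_eq_false_iff, decide_eq_false_iff_not]
  omega

-- A's ts loop: slicing word-sized chunks off the flat score list = per-word sums
theorem ts_fold (g : Char → Int) :
    ∀ (wl : List String) (ts0 : List Int),
      List.foldl (fun (st : List Int × List Int) i =>
          (st.1 ++ [(PySem.List.slice st.2 none (some i)).sum],
           PySem.List.slice st.2 (some i) none))
        (ts0, wl.flatMap (fun w => w.toList.map g)) (wl.map (fun w => PySem.Str.len w))
      = (ts0 ++ wl.map (fun w => (w.toList.map g).sum), []) := by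
  intro wl
  induction wl with
  | nil => simp
  | cons w t ih =>
    intro ts0
    simp only [List.map_cons, List.flatMap_cons, List.foldl_cons]
    have hlen : PySem.Str.len w = ((w.toList.map g).length : Int) := by
      simp [PySem.Str.len]
    rw [hlen,
        PySem.List.slice_to _ (b := ((w.toList.map g).length : Int)) (by positivity),
        PySem.List.slice_from _ (a := ((w.toList.map g).length : Int)) (by positivity)]
    simp only [Int.toNat_natCast, List.take_left, List.drop_left]
    rw [ih]
    simp

-- A's database loop: pairing words with their scores = a plain insert fold
theorem db_fold (g : String → Int) :
    ∀ (wl : List String) (db0 : PySem.Dict String Int),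
      List.foldl (fun (st : PySem.Dict String Int × List Int) i =>
          match st.2 with
          | [] => st
          | j :: _ => (st.1.insert i j, (PySem.List.remove? st.2 j).getD st.2))
        (db0, wl.map g) wl
      = (wl.foldl (fun d w => d.insert w (g w)) db0, []) := by
  intro wl
  induction wl with
  | nil => simp
  | cons w t ih =>
    intro db0
    simp only [List.map_cons, List.foldl_cons, PySem.List.remove?_cons_self, Option.getD_some]
    exact ih (db0.insert w (g w))

theorem get_fold (g : String → Int) (k : String) :
    ∀ (wl : List String) (d : PySem.Dict String Int),
      (wl.foldl (fun d w => d.insert w (g w)) d).get? k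
      = if k ∈ wl then some (g k) else d.get? k := by
  intro wl
  induction wl with
  | nil => simp
  | cons w t ih =>
    intro d
    simp only [List.foldl_cons, ih]
    by_cases hk : k ∈ t
    · simp [hk]
    · by_cases hw : k = w
      · subst hw; simp [hk, PySem.Dict.get?_insert_self]
      · simp [hk, hw, PySem.Dict.get?_insert_of_ne _ _ hw]

theorem update_eq_ddGo :
    ∀ (xs seen : List String), PySem.Set.update seen xs = seen ++ ddGo seen xs := by
  intro xs
  induction xs with
  | nil => simp [PySem.Set.update, ddGo]
  | cons x t ih =>
    intro seen
    simp only [PySem.Set.update, List.foldl_cons, ddGo]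
    by_cases h : PySem.Set.contains seen x
    · have : PySem.Set.add seen x = seen := by unfold PySem.Set.add; rw [if_pos h]
      rw [show List.foldl PySem.Set.add (PySem.Set.add seen x) t
            = PySem.Set.update (PySem.Set.add seen x) t from rfl, this, ih seen, if_pos h]
    · have : PySem.Set.add seen x = seen ++ [x] := by unfold PySem.Set.add; rw [if_neg h]
      rw [show List.foldl PySem.Set.add (PySem.Set.add seen x) t
            = PySem.Set.update (PySem.Set.add seen x) t from rfl, this, ih (seen ++ [x]), if_neg h]
      simp

-- duplicates never move the running max, so the max over the deduped keys is the max over all words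
theorem skip_fold :
    ∀ (xs seen : List String) (acc : Option String),
      (∀ y ∈ seen, ∃ m, acc = some m ∧ wScore y ≤ wScore m) →
      List.foldl mstep acc (ddGo seen xs) = List.foldl mstep acc xs := by
  intro xs
  induction xs with
  | nil => intro seen acc _; rfl
  | cons x t ih =>
    intro seen acc hinv
    simp only [ddGo, List.foldl_cons]
    by_cases h : PySem.Set.contains seen x
    · rw [if_pos h]
      obtain ⟨m, rfl, hle⟩ := hinv x ((PySem.Set.contains_iff seen x).mp h)
      have : mstep (some m) x = some m := by
        simp [mstep, not_lt.mpr hle]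
      rw [ih seen _ hinv, this]
    · rw [if_neg h]
      simp only [List.foldl_cons]
      apply ih (seen ++ [x])
      intro y hy
      rcases List.mem_append.mp hy with hy | hy
      · obtain ⟨m, rfl, hle⟩ := hinv y hy
        simp only [mstep]
        split
        · rename_i hlt
          exact ⟨x, rfl, le_of_lt (lt_of_le_of_lt hle hlt)⟩
        · exact ⟨m, rfl, hle⟩
      · have hxy : y = x := by simpa using hy
        subst hxy
        cases acc with
        | none => exact ⟨y, rfl, le_refl _⟩
        | some m =>
          simp only [mstep]
          split
          · exact ⟨y, rfl, le_refl _⟩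
          · rename_i hlt
            exact ⟨m, rfl, not_lt.mp hlt⟩

theorem max?_cons_cons (f : String → Int) (m x : String) (t : List String) :
    PySem.List.max? (m :: x :: t) f = PySem.List.max? ((if f m < f x then x else m) :: t) f := by
  by_cases h : f m < f x <;> simp [PySem.List.max?, List.foldl_cons, h]

theorem max?_congr (f g : String → Int) :
    ∀ (t : List String) (m : String), f m = g m → (∀ x ∈ t, f x = g x) →
      PySem.List.max? (m :: t) f = PySem.List.max? (m :: t) g := by
  intro t
  induction t with
  | nil => intro m _ _; rfl
  | cons x t ih =>
    intro m hm hx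
    have h1 : f x = g x := hx x (by simp)
    have ht : ∀ y ∈ t, f y = g y := fun y hy => hx y (List.mem_cons_of_mem _ hy)
    rw [max?_cons_cons f, max?_cons_cons g, ← hm, ← h1]
    by_cases h : f m < f x
    · rw [if_pos h]; exact ih x h1 ht
    · rw [if_neg h]; exact ih m hm ht

theorem max?_eq_mstep (ks : List String) :
    PySem.List.max? ks wScore = List.foldl mstep none ks := by
  unfold PySem.List.max?
  congr 1
  funext acc x
  cases acc <;> rfl

-- B's score  sum(map(ord, w)) - 96*len(w)  is the per-letter score sum
theorem score_expand (w : String) :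
    (w.toList.map (fun c => (c.toNat : Int))).sum - 96 * PySem.Str.len w = wScore w := by
  unfold wScore
  have h : ∀ l : List Char,
      (l.map (fun c => (c.toNat : Int) - 96)).sum
        = (l.map (fun c => (c.toNat : Int))).sum - 96 * l.length := by
    intro l
    induction l with
    | nil => simp
    | cons c t ih => simp [ih]; ring
  rw [h]
  simp [PySem.Str.len]

-- B's fold tracks exactly the first-extremal state of Python's max
theorem ba_core :
    ∀ (t : List String) (m : String),
      List.foldl (fun (best : String × Int) w =>
          if best.2 < wScore w then (w, wScore w) else best) (m, wScore m) t
      = ((List.foldl mstep (some m) t).getD "",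
         wScore ((List.foldl mstep (some m) t).getD "")) := by
  intro t
  induction t with
  | nil => simp
  | cons w t ih =>
    intro m
    simp only [List.foldl_cons, mstep]
    by_cases h : wScore m < wScore w
    · rw [if_pos h, if_pos h]
      exact ih w
    · rw [if_neg h, if_neg h]
      exact ih m

theorem ba_fold (t : List String) (m : String) :
    List.foldl (fun (best : String × Int) w =>
        let s := (w.toList.map (fun c => (c.toNat : Int))).sum - 96 * PySem.Str.len w
        if best.2 < s then (w, s) else best) (m, wScore m) t
      = ((List.foldl mstep (some m) t).getD "",
         wScore ((List.foldl mstep (some m) t).getD "")) := by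
  rw [PySem.List.foldl_congr_mem t _
        (fun (best : String × Int) w => if best.2 < wScore w then (w, wScore w) else best) _
        (by intro acc w _; simp only; rw [score_expand w])]
  exact ba_core t m

theorem score_pos (w : String) (hne : w.toList ≠ [])
    (hlc : ∀ c ∈ w.toList, 97 ≤ c.toNat ∧ c.toNat ≤ 122) : 1 ≤ wScore w := by
  unfold wScore
  cases hw : w.toList with
  | nil => exact absurd hw hne
  | cons c t =>
    have hc := hlc c (by rw [hw]; simp)
    have ht : 0 ≤ (t.map (fun c => (c.toNat : Int) - 96)).sum := by
      apply List.sum_nonneg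
      intro a ha
      obtain ⟨d, hd, rfl⟩ := List.mem_map.mp ha
      have := hlc d (by rw [hw]; exact List.mem_cons_of_mem _ hd)
      omega
    simp only [List.map_cons, List.sum_cons]
    omega

theorem maxkey_eq (G : String → Int) (ws ks : List String)
    (hks : ∀ k ∈ ks, k ∈ ws) (hG : ∀ k ∈ ks, G k = wScore k) :
    PySem.List.max? ks
      (fun k => (List.foldl (fun d w => d.insert w (G w)) PySem.Dict.empty ws).getD k 0)
      = List.foldl mstep none ks := by
  have hf : ∀ k ∈ ks,
      (List.foldl (fun d w => d.insert w (G w)) PySem.Dict.empty ws).getD k 0 = wScore k := by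
    intro k hk
    rw [PySem.Dict.getD, get_fold G k ws PySem.Dict.empty, if_pos (hks k hk)]
    simpa using hG k hk
  cases ks with
  | nil => rfl
  | cons k kt =>
    rw [max?_congr _ wScore kt k (hf k (by simp))
          (fun y hy => hf y (List.mem_cons_of_mem _ hy)),
        max?_eq_mstep]

-- ===== VERDICT (by name: the statement is the Claim_ definition above) =====
theorem high_spec : Claim_equal_high := by
  intro x _ hpre
  obtain ⟨hp1, hp2⟩ := hpre
  obtain ⟨c0, hc0mem, hc0⟩ : ∃ c ∈ x.toList, 97 ≤ c.toNat ∧ c.toNat ≤ 122 := by simpa using hp1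
  have hall : ∀ c ∈ x.toList, (97 ≤ c.toNat ∧ c.toNat ≤ 122) ∨ c ∈ [' ', '\t', '\n', '\r'] := by
    intro c hc
    have h := (List.all_eq_true.mp hp2) c hc
    simp only [Bool.or_eq_true, Bool.and_eq_true, decide_eq_true_eq, beq_iff_eq] at h
    rcases h with (((⟨a, b⟩ | h) | h) | h) | h
    · exact Or.inl ⟨a, b⟩
    all_goals exact Or.inr (by simp [h])
  unfold Spec_high
  have hbridge : ∀ w ∈ PySem.Str.split₀ x, w.toList ∈ PySem.Chars.split₀ x.toList := by
    intro w hw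
    rw [← PySem.Str.split₀_map_toList]
    exact List.mem_map_of_mem hw
  have hws : ∀ w ∈ PySem.Str.split₀ x,
      w.toList ≠ [] ∧ ∀ c ∈ w.toList, 97 ≤ c.toNat ∧ c.toNat ≤ 122 := by
    intro w hw
    refine go_sound _ x.toList [] [] ?_ (by simp) (by simp) w.toList (hbridge w hw)
    intro c hc
    rcases hall c hc with h | h
    · exact Or.inr h
    · left
      rcases (by simpa using h : c = ' ' ∨ c = '\t' ∨ c = '\n' ∨ c = '\r') with
        rfl | rfl | rfl | rfl <;> decide
  have hne : PySem.Str.split₀ x ≠ [] := by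
    intro hnil
    apply go_ne x.toList [] [] (Or.inl ⟨c0, hc0mem, lc_not_space c0 hc0.1 hc0.2⟩)
    have h := PySem.Str.split₀_map_toList x
    rw [hnil] at h
    exact h.symm
  obtain ⟨w0, rest, hsplit⟩ := List.exists_cons_of_ne_nil hne
  simp only [high, high_alt]
  simp only [PySem.List.foldl_append_singleton_eq_map, PySem.List.foldl_append_eq_flatMap,
    List.nil_append]
  rw [ts_fold]
  simp only [List.nil_append]
  rw [db_fold]
  simp only []
  rw [PySem.Dict.keys_foldl_insert]
  rw [show PySem.Dict.empty.keys = ([] : List String) from rfl]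
  rw [update_eq_ddGo]
  simp only [List.nil_append]
  rw [maxkey_eq _ (PySem.Str.split₀ x) (ddGo [] (PySem.Str.split₀ x)) ?hks ?hG]
  case hks =>
    intro k hk
    have : k ∈ PySem.Set.update [] (PySem.Str.split₀ x) := by
      rw [update_eq_ddGo]; simpa using hk
    simpa using (PySem.Set.mem_update [] (PySem.Str.split₀ x) k).mp this
  case hG =>
    intro k hk
    have hkws : k ∈ PySem.Str.split₀ x := by
      have : k ∈ PySem.Set.update [] (PySem.Str.split₀ x) := by
        rw [update_eq_ddGo]; simpa using hk
      simpa using (PySem.Set.mem_update [] (PySem.Str.split₀ x) k).mp this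
    obtain ⟨-, hlc⟩ := hws k hkws
    unfold wScore
    congr 1
    apply List.map_congr_left
    intro c hc
    exact dA_getD c (hlc c hc).1 (hlc c hc).2
  rw [skip_fold (PySem.Str.split₀ x) [] none (by intro y hy; simp at hy)]
  have hmem0 : w0 ∈ PySem.Str.split₀ x := by rw [hsplit]; simp
  have h0 : 1 ≤ wScore w0 := score_pos w0 (hws w0 hmem0).1 (hws w0 hmem0).2
  have hcond : (-1 : Int) < wScore w0 := by omega
  rw [hsplit]
  simp only [List.foldl_cons]
  rw [show mstep none w0 = some w0 from rfl, score_expand w0, if_pos hcond]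
  rw [ba_fold]
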